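-- pv_equiv track=rewrite | github.com/bodya4000/labs-repo-2sem | lab2/src/hamsters_algorithm.py | get_neighbours_needs
-- ===== SOURCE A (Python) =====
-- def get_hamster_need(hamster, neighbours_count):
--     return hamster[0] + hamster[1] * neighbours_count
--
-- def get_neighbours_needs(neighbours):
--     if len(neighbours) == 0:
--         return 0
--
--     neighbours_need = 0
--     neighbours_count = len(neighbours) - 1
--     for neighbour in neighbours:
--         current_neighbour_need = get_hamster_need(neighbour, neighbours_count)
--         neighbours_need += current_neighbour_need
--     return neighbours_need
-- ===== SOURCE B (Python) =====
-- def get_neighbours_needs(neighbours):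
--     # Incremental (online) algorithm: hamsters join the group one by one.
--     # When (a, b) joins a group of n members whose extras sum to sb, the
--     # group's total need grows by a + b*n (the newcomer's need) plus sb
--     # (each existing member gains one more neighbour). len() is never used.
--     total, sb, n = 0, 0, 0
--     for a, b in neighbours:
--         total, sb, n = total + a + b * n + sb, sb + b, n + 1
--     return total
-- ===== Notes on version B (the rewrite author's own statement) =====
-- stated objective: alternative
-- what changed: Replaces compute-count-then-loop by an incremental online algorithm: hamsters join a group one at a time and the maintained (total, extras-sum, size) state is updated on each join (newcomer's need at current size plus one extra per existing member), so len(neighbours) is never computed.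
import Mathlib
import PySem

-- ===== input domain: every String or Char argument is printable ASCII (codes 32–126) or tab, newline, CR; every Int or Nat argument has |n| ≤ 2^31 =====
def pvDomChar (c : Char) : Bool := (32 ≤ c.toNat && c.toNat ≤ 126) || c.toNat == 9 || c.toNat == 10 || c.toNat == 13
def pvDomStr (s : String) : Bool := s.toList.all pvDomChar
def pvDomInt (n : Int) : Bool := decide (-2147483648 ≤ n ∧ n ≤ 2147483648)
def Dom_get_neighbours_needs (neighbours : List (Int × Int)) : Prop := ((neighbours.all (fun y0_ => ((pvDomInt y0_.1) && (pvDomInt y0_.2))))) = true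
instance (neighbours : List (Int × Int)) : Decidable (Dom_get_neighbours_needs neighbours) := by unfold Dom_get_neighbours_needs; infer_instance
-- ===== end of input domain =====

-- B is an incremental (online) algorithm: hamsters join the group one at a time and
-- the maintained (total, extras-sum, size) state is updated on each join; same O(n), alternative decomposition.

-- ===== PORT A =====
def get_hamster_need (hamster : Int × Int) (neighbours_count : Int) : Int :=
  hamster.1 + hamster.2 * neighbours_count

def get_neighbours_needs (neighbours : List (Int × Int)) : Int :=
  if neighbours.length = 0 then 0
  else
    let neighbours_count : Int := (neighbours.length : Int) - 1
    neighbours.foldl (fun neighbours_need neighbour =>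
      neighbours_need + get_hamster_need neighbour neighbours_count) 0

-- ===== PORT B =====
-- state (total, sb, n): group's total need, sum of its extras, member count
def get_neighbours_needs_alt (neighbours : List (Int × Int)) : Int :=
  (neighbours.foldl
    (fun st h =>
      let (total, sb, n) := st
      (total + h.1 + h.2 * n + sb, sb + h.2, n + 1))
    ((0, 0, 0) : Int × Int × Int)).1

-- ===== PRECONDITION & SPEC =====
def Spec_get_neighbours_needs (neighbours : List (Int × Int)) (out : Int) : Prop := out = get_neighbours_needs_alt neighbours
instance (neighbours : List (Int × Int)) (out : Int) : Decidable (Spec_get_neighbours_needs neighbours out) := by unfold Spec_get_neighbours_needs; infer_instance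

-- ===== CLAIM =====
def Claim_equal_get_neighbours_needs : Prop := ∀ (neighbours : List (Int × Int)), Dom_get_neighbours_needs neighbours → Spec_get_neighbours_needs neighbours (get_neighbours_needs neighbours)

-- ===== LEMMAS AND PROOFS =====
lemma join_fold_eq (ns : List (Int × Int)) (t sb n : Int) :
    ns.foldl (fun st h =>
        let (total, sb, n) := st
        (total + h.1 + h.2 * n + sb, sb + h.2, n + 1)) (t, sb, n)
      = (t + (ns.map (fun h => h.1)).sum + sb * ns.length
           + (n + (ns.length : Int) - 1) * (ns.map (fun h => h.2)).sum,
         sb + (ns.map (fun h => h.2)).sum, n + ns.length) := by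
  induction ns generalizing t sb n with
  | nil => simp
  | cons hd tl ih =>
    rw [List.foldl_cons, ih]
    simp
    exact ⟨by push_cast; ring, by omega, by push_cast; omega⟩

lemma foldl_need_eq (neighbours : List (Int × Int)) (c acc : Int) :
    neighbours.foldl (fun s n => s + get_hamster_need n c) acc
      = acc + (neighbours.map (fun h => h.1)).sum + (neighbours.map (fun h => h.2)).sum * c := by
  induction neighbours generalizing acc with
  | nil => simp
  | cons hd tl ih =>
    rw [List.foldl_cons, ih]
    simp [get_hamster_need]
    ring

-- ===== VERDICT =====
theorem get_neighbours_needs_spec : Claim_equal_get_neighbours_needs := by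
  intro ns _
  unfold Spec_get_neighbours_needs get_neighbours_needs get_neighbours_needs_alt
  rw [join_fold_eq]
  cases ns with
  | nil => simp
  | cons h t =>
    have h1 : (h :: t).length ≠ 0 := by simp
    rw [if_neg h1, foldl_need_eq]
    push_cast
    ring
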